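-- pv_equiv track=rewrite | github.com/KleinerBaum/GerrisErfolgsTracker | gerris_erfolgs_tracker/integrations/ical.py | _unfold_lines
-- ===== SOURCE A (Python) =====
-- from typing import Iterable
--
-- def _unfold_lines(lines: Iterable[str]) -> list[str]:
--     unfolded: list[str] = []
--     buffer: list[str] = []
--     for line in lines:
--         if line.startswith(" ") or line.startswith("\t"):
--             if buffer:
--                 buffer.append(line.lstrip())
--             else:
--                 buffer = [line.lstrip()]
--             continue
--         if buffer:
--             unfolded.append("".join(buffer))
--             buffer = []
--         buffer.append(line)
--     if buffer:
--         unfolded.append("".join(buffer))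
--     return unfolded
-- ===== SOURCE B (Python) =====
-- def _unfold_lines(lines):
--     result: list[str] = []
--     for line in lines:
--         if line.startswith(" ") or line.startswith("\t"):
--             if result:
--                 result[-1] += line.lstrip()
--             else:
--                 result.append(line.lstrip())
--         else:
--             result.append(line)
--     return result
-- ===== Notes on version B (the rewrite author's own statement) =====
-- stated objective: simpler
-- what changed: Builds the output list directly, concatenating continuation lines onto the last emitted entry in place, instead of maintaining a deferred piece buffer that is joined and flushed at each boundary and at the end.
import Mathlib
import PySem

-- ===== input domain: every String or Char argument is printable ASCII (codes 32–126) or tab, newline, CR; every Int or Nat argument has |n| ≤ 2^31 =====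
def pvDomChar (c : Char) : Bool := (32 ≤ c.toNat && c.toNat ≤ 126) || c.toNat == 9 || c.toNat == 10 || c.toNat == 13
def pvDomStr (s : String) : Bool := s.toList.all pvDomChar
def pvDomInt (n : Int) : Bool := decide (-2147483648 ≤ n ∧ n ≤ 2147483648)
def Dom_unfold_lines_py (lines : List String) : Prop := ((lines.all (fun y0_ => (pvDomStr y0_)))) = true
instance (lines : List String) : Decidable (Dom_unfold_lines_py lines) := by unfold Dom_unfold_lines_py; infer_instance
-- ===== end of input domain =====

-- B replaces A's deferred piece-buffer-and-join accumulator with direct output building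
-- (continuations are concatenated onto the last emitted entry in place); same cost, simpler flow.

-- ===== PORT A =====
-- one loop iteration of A: state = (unfolded, buffer)
def unfoldStepA (st : List String × List String) (line : String) : List String × List String :=
  if PySem.Str.startswith line " " || PySem.Str.startswith line "\t" then
    if st.2 ≠ [] then (st.1, st.2 ++ [PySem.Str.lstrip line])
    else (st.1, [PySem.Str.lstrip line])
  else
    let st' := if st.2 ≠ [] then (st.1 ++ [PySem.Str.join "" st.2], ([] : List String)) else st
    (st'.1, st'.2 ++ [line])

def unfold_lines_py (lines : List String) : List String :=
  let st := lines.foldl unfoldStepA ([], [])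
  if st.2 ≠ [] then st.1 ++ [PySem.Str.join "" st.2] else st.1

-- ===== PORT B =====
-- one loop iteration of B: state = result list built directly
def unfoldStepB (result : List String) (line : String) : List String :=
  if PySem.Str.startswith line " " || PySem.Str.startswith line "\t" then
    if result ≠ [] then result.dropLast ++ [result.getLast! ++ PySem.Str.lstrip line]
    else [PySem.Str.lstrip line]
  else result ++ [line]

def unfold_lines_py_alt (lines : List String) : List String :=
  lines.foldl unfoldStepB []

-- ===== PRECONDITION & SPEC =====
def Spec_unfold_lines_py (lines : List String) (out : List String) : Prop := out = unfold_lines_py_alt lines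
instance (lines : List String) (out : List String) : Decidable (Spec_unfold_lines_py lines out) := by unfold Spec_unfold_lines_py; infer_instance

-- ===== CLAIM (what is proved, stated in full; the proofs are below) =====
def Claim_equal_unfold_lines_py : Prop := ∀ (lines : List String), Dom_unfold_lines_py lines → Spec_unfold_lines_py lines (unfold_lines_py lines)

-- ===== LEMMAS AND PROOFS =====

lemma chars_join_nil_concat (b : List (List Char)) (x : List Char) :
    PySem.Chars.join [] (b ++ [x]) = PySem.Chars.join [] b ++ x := by
  induction b with
  | nil => simp [PySem.Chars.join_singleton, PySem.Chars.join_nil]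
  | cons a l ih =>
    cases l with
    | nil => simp [PySem.Chars.join_cons_cons, PySem.Chars.join_singleton]
    | cons c r =>
      simp only [List.cons_append, PySem.Chars.join_cons_cons] at *
      simp [ih]

lemma str_join_nil_singleton (x : String) : PySem.Str.join "" [x] = x := by
  simp [PySem.Str.join]

lemma str_join_nil_concat (b : List String) (x : String) :
    PySem.Str.join "" (b ++ [x]) = PySem.Str.join "" b ++ x := by
  have h := chars_join_nil_concat (b.map String.toList) x.toList
  apply String.toList_injective
  simpa using h

-- finalize A's state (the post-loop flush)
def unfoldFinA (st : List String × List String) : List String :=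
  if st.2 ≠ [] then st.1 ++ [PySem.Str.join "" st.2] else st.1

lemma unfold_inv (lines : List String) :
    ∀ (u b : List String), (b = [] → u = []) →
    unfoldFinA (lines.foldl unfoldStepA (u, b))
      = lines.foldl unfoldStepB (if b = [] then u else u ++ [PySem.Str.join "" b]) := by
  induction lines with
  | nil =>
    intro u b hb
    by_cases h : b = [] <;> simp [unfoldFinA, h]
  | cons line rest ih =>
    intro u b hb
    simp only [List.foldl_cons]
    by_cases hc : (PySem.Str.startswith line " " || PySem.Str.startswith line "\t") = true
    · by_cases h : b = []
      · have hu := hb h; subst h hu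
        have hA : unfoldStepA ([], []) line = ([], [PySem.Str.lstrip line]) := by
          simp only [unfoldStepA]; rw [if_pos hc]; simp
        have hB : unfoldStepB (if ([] : List String) = [] then ([] : List String) else [] ++ [PySem.Str.join "" []]) line
            = [PySem.Str.lstrip line] := by
          rw [if_pos rfl]; simp only [unfoldStepB]; rw [if_pos hc]; simp
        rw [hA, hB, ih [] [PySem.Str.lstrip line] (by simp)]
        simp [str_join_nil_singleton]
      · have hA : unfoldStepA (u, b) line = (u, b ++ [PySem.Str.lstrip line]) := by
          simp only [unfoldStepA]; rw [if_pos hc]; simp [h]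
        have hB : unfoldStepB (if b = [] then u else u ++ [PySem.Str.join "" b]) line
            = u ++ [PySem.Str.join "" b ++ PySem.Str.lstrip line] := by
          rw [if_neg h]; simp only [unfoldStepB]; rw [if_pos hc]
          simp
        rw [hA, hB, ih u (b ++ [PySem.Str.lstrip line]) (by simp)]
        simp [str_join_nil_concat, h]
    · by_cases h : b = []
      · have hu := hb h; subst h hu
        have hA : unfoldStepA (([] : List String), ([] : List String)) line = ([], [line]) := by
          simp only [unfoldStepA]; rw [if_neg hc]; simp
        have hB : unfoldStepB (if ([] : List String) = [] then ([] : List String) else [] ++ [PySem.Str.join "" []]) line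
            = [line] := by
          rw [if_pos rfl]; simp only [unfoldStepB]; rw [if_neg hc]; simp
        rw [hA, hB, ih [] [line] (by simp)]
        simp [str_join_nil_singleton]
      · have hA : unfoldStepA (u, b) line = (u ++ [PySem.Str.join "" b], [line]) := by
          simp only [unfoldStepA]; rw [if_neg hc]; simp [h]
        have hB : unfoldStepB (if b = [] then u else u ++ [PySem.Str.join "" b]) line
            = (u ++ [PySem.Str.join "" b]) ++ [line] := by
          rw [if_neg h]; simp only [unfoldStepB]; rw [if_neg hc]
        rw [hA, hB, ih (u ++ [PySem.Str.join "" b]) [line] (by simp)]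
        simp [str_join_nil_singleton]

-- ===== VERDICT (by name: the statement is the Claim_ definition above) =====
theorem unfold_lines_py_spec : Claim_equal_unfold_lines_py := by
  intro lines _
  show unfold_lines_py lines = unfold_lines_py_alt lines
  have h := unfold_inv lines [] [] (fun _ => rfl)
  simpa [unfold_lines_py, unfold_lines_py_alt, unfoldFinA] using h
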